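-- pv_equiv track=rewrite | github.com/ulelab/ultraplex | v6.py | score_barcode_for_dict
-- ===== SOURCE A (Python) =====
-- def score_barcode_for_dict(seq, barcodes, min_score):
-- 	"""
-- 	this function scores a given sequence against all the barcodes
-- 	it's used for the 5' barcode only
-- 	"""
--
-- 	# first, remove Ns from barcode list
-- 	barcodes_no_N = []
-- 	for i in range(len(barcodes)):
-- 		this_bc = barcodes[i]
-- 		barcodes_no_N.append(this_bc.replace("N", ""))
--
-- 	# Now, score the sequence
-- 	score_list = []
--
-- 	for this_bc in barcodes_no_N:
-- 		# find length of this barcode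
-- 		this_bc_l = len(this_bc)
--
-- 		# score the barcode against the read, penalty for N in the read
-- 		score = sum(a == b for a, b in zip(this_bc, seq))
--
-- 		# append to score list
-- 		score_list.append(score)
--
-- 	# Find the best score
-- 	best_score = max(score_list)
--
-- 	if best_score < min_score:
-- 		winner = "no_match"
-- 	else:
-- 		# check that there is only one barcode with the max score
-- 		winner_indicies = [i for i in range(len(score_list)) if score_list[i] == best_score]
--
-- 		if len(winner_indicies) > 1:
-- 			winner = "no_match"
-- 		else:  # if there is only one
-- 			winner = barcodes[winner_indicies[0]]
--
-- 	return (winner)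
-- ===== SOURCE B (Python) =====
-- def score_barcode_for_dict(seq, barcodes, min_score):
--     """Single pass: score each stripped barcode and track the best score,
--     its first index and how many barcodes tie at the best score."""
--     best_score = None
--     best_index = 0
--     tie_count = 0
--     for i, bc in enumerate(barcodes):
--         stripped = bc.replace("N", "")
--         score = sum(a == b for a, b in zip(stripped, seq))
--         if best_score is None or score > best_score:
--             best_score, best_index, tie_count = score, i, 1
--         elif score == best_score:
--             tie_count += 1
--     if best_score is None:
--         raise ValueError("max() arg is an empty sequence")
--     if best_score < min_score or tie_count > 1:
--         return "no_match"
--     return barcodes[best_index]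
-- ===== Notes on version B (the rewrite author's own statement) =====
-- stated objective: alternative
-- what changed: Replaces A's three passes (strip all barcodes, build a full score list, then max plus a winner-index comprehension) with one fold that maintains best_score, first best index and a tie counter, so no intermediate lists are built.
import Mathlib
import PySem

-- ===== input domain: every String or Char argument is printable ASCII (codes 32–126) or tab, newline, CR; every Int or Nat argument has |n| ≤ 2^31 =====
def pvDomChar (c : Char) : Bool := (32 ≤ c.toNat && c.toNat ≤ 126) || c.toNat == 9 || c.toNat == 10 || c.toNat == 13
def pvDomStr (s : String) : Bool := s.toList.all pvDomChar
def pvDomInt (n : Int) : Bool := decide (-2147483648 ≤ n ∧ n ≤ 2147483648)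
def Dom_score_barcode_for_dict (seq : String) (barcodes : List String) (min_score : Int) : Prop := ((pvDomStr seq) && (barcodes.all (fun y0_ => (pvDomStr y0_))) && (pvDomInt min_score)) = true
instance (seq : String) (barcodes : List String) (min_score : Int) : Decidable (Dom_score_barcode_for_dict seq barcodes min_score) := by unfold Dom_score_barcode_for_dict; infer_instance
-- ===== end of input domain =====

-- B replaces A's three passes and intermediate lists with one fold keeping (best score, first best index, tie count); same return value.
-- ===== PORT A =====
-- shared helpers: both Pythons contain literally `bc.replace("N","")` and `sum(a == b for a, b in zip(this_bc, seq))`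
def pvStrip (bc : String) : String := PySem.Str.replace bc "N" ""
def pvScore (seq bc : String) : Int :=
  ((bc.toList.zip seq.toList).map (fun p => if p.1 == p.2 then (1 : Int) else 0)).sum

def score_barcode_for_dict (seq : String) (barcodes : List String) (min_score : Int) : String :=
  let barcodes_no_N := (PySem.List.pyRange 0 (PySem.List.len barcodes)).foldl
      (fun acc i => acc ++ [pvStrip (PySem.List.pyGetD barcodes i "")]) []
  let score_list := barcodes_no_N.foldl (fun acc bc => acc ++ [pvScore seq bc]) []
  match PySem.List.max? score_list (fun y => y) with
  | none => ""
  | some best_score =>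
    if best_score < min_score then "no_match"
    else
      let winner_indicies := (PySem.List.pyRange 0 (PySem.List.len score_list)).foldl
          (fun acc i => if PySem.List.pyGetD score_list i 0 == best_score then acc ++ [i] else acc) []
      if 1 < winner_indicies.length then "no_match"
      else PySem.List.pyGetD barcodes (winner_indicies.headD 0) ""

-- ===== PORT B =====
def pvAltLoop (seq : String) : List String → Int → (Option Int × Int × Int) → Option Int × Int × Int
  | [], _, st => st
  | bc :: rest, i, (bs, bi, tc) =>
      let score := pvScore seq (pvStrip bc)
      let st' : Option Int × Int × Int :=
        match bs with
        | none => (some score, i, 1)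
        | some b =>
            if b < score then (some score, i, 1)
            else if score == b then (some b, bi, tc + 1)
            else (some b, bi, tc)
      pvAltLoop seq rest (i + 1) st'

def score_barcode_for_dict_alt (seq : String) (barcodes : List String) (min_score : Int) : String :=
  match pvAltLoop seq barcodes 0 (none, 0, 0) with
  | (none, _, _) => ""
  | (some best_score, best_index, tie_count) =>
      if best_score < min_score || 1 < tie_count then "no_match"
      else PySem.List.pyGetD barcodes best_index ""

-- ===== PRECONDITION & SPEC =====
-- Pre_ excludes exactly the empty barcode list, on which A raises ValueError (max() of an empty sequence); B also raises there.
def Pre_score_barcode_for_dict (seq : String) (barcodes : List String) (min_score : Int) : Prop :=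
  barcodes ≠ []
instance (seq : String) (barcodes : List String) (min_score : Int) : Decidable (Pre_score_barcode_for_dict seq barcodes min_score) := by unfold Pre_score_barcode_for_dict; infer_instance

def pvWitness_score_barcode_for_dict : String × List String × Int := ("ACG", ["ACT", "GGN"], 1)

def Spec_score_barcode_for_dict (seq : String) (barcodes : List String) (min_score : Int) (out : String) : Prop := out = score_barcode_for_dict_alt seq barcodes min_score
instance (seq : String) (barcodes : List String) (min_score : Int) (out : String) : Decidable (Spec_score_barcode_for_dict seq barcodes min_score out) := by unfold Spec_score_barcode_for_dict; infer_instance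

-- ===== CLAIM (what is proved, stated in full; the proofs are below) =====
def Claim_equal_score_barcode_for_dict : Prop := ∀ (seq : String) (barcodes : List String) (min_score : Int), Dom_score_barcode_for_dict seq barcodes min_score → Pre_score_barcode_for_dict seq barcodes min_score → Spec_score_barcode_for_dict seq barcodes min_score (score_barcode_for_dict seq barcodes min_score)

-- ===== LEMMAS AND PROOFS =====

theorem pv_winner_eq (sl : List Int) (v : Int) :
    (PySem.List.pyRange 0 (PySem.List.len sl)).foldl
      (fun acc i => if PySem.List.pyGetD sl i 0 == v then acc ++ [i] else acc) []
    = ((List.range sl.length).filter (fun (k : Nat) => sl.getD k 0 == v)).map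
        (fun (k : Nat) => (k : Int)) := by
  rw [PySem.List.foldl_append_if (fun i => PySem.List.pyGetD sl i 0 == v) (fun i => i),
      PySem.List.pyRange_one, List.filter_map]
  simp [Function.comp_def, PySem.List.pyGetD_natCast, PySem.List.len]
theorem pv_filt_length (sl : List Int) (v : Int) :
    ((List.range sl.length).filter (fun k => sl.getD k 0 == v)).length = sl.count v := by
  induction sl with
  | nil => simp
  | cons a t ih =>
      rw [List.length_cons, List.range_succ_eq_map, List.filter_cons, List.filter_map]
      simp only [List.getD_cons_zero, List.getD_cons_succ, Function.comp_def]
      rw [List.count_cons]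
      by_cases h : a = v
      · simp [h, ← ih]
      · simp [h, ← ih, Ne.symm]

theorem pv_filt_head (sl : List Int) (v : Int) (hv : v ∈ sl) :
    ((List.range sl.length).filter (fun k => sl.getD k 0 == v)).headD 0 = sl.idxOf v := by
  induction sl with
  | nil => simp at hv
  | cons a t ih =>
      rw [List.length_cons, List.range_succ_eq_map, List.filter_cons, List.filter_map]
      simp only [List.getD_cons_zero, List.getD_cons_succ, Function.comp_def]
      by_cases h : a = v
      · simp [h, List.idxOf_cons_self]
      · have hvt : v ∈ t := by
          cases hv
          · exact absurd rfl h
          · assumption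
        have hne : ((List.range t.length).filter (fun k => t.getD k 0 == v)) ≠ [] := by
          have hl := pv_filt_length t v
          have hc : 0 < t.count v := List.count_pos_iff.mpr hvt
          exact List.ne_nil_of_length_pos (by omega)
        obtain ⟨r, rs, hr⟩ := List.exists_cons_of_ne_nil hne
        simp only [h, beq_iff_eq, hr, List.map_cons]
        rw [List.idxOf_cons_ne _ (by exact h), ← ih hvt, hr]
        simp

theorem pv_winner_head (sl : List Int) (v : Int) :
    ((((List.range sl.length).filter (fun (k : Nat) => sl.getD k 0 == v)).map
        (fun (k : Nat) => (k : Int))).headD 0)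
      = if v ∈ sl then (sl.idxOf v : Int) else 0 := by
  by_cases hv : v ∈ sl
  · rw [if_pos hv]
    have hne : ((List.range sl.length).filter (fun k => sl.getD k 0 == v)) ≠ [] := by
      have hl := pv_filt_length sl v
      have hc : 0 < sl.count v := List.count_pos_iff.mpr hv
      exact List.ne_nil_of_length_pos (by omega)
    obtain ⟨r, rs, hr⟩ := List.exists_cons_of_ne_nil hne
    have hh := pv_filt_head sl v hv
    rw [hr] at hh ⊢
    simp only [List.map_cons, List.headD_cons] at hh ⊢
    rw [← hh]
  · rw [if_neg hv]
    have hl := pv_filt_length sl v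
    have hc : sl.count v = 0 := List.count_eq_zero.mpr hv
    have : ((List.range sl.length).filter (fun k => sl.getD k 0 == v)) = [] :=
      List.eq_nil_of_length_eq_zero (by omega)
    rw [this]
    simp

theorem pvA_eq (seq : String) (a : String) (t : List String) (min_score : Int) :
    score_barcode_for_dict seq (a :: t) min_score =
      (if (t.map (fun bc => pvScore seq (pvStrip bc))).foldl max (pvScore seq (pvStrip a)) < min_score
       then "no_match"
       else if 1 < ((a :: t).map (fun bc => pvScore seq (pvStrip bc))).count
              ((t.map (fun bc => pvScore seq (pvStrip bc))).foldl max (pvScore seq (pvStrip a)))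
       then "no_match"
       else PySem.List.pyGetD (a :: t)
              ((((a :: t).map (fun bc => pvScore seq (pvStrip bc))).idxOf
                 ((t.map (fun bc => pvScore seq (pvStrip bc))).foldl max (pvScore seq (pvStrip a)))) : Int) "") := by
  have h1 : (PySem.List.pyRange 0 (PySem.List.len (a :: t))).foldl
      (fun acc i => acc ++ [pvStrip (PySem.List.pyGetD (a :: t) i "")]) [] = (a :: t).map pvStrip := by
    rw [PySem.List.foldl_pyRange_zero_pyGetD (a :: t) "" (fun acc bc => acc ++ [pvStrip bc]) []]
    rw [PySem.List.foldl_append_singleton_eq_map]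
    simp
  have h2 : ((a :: t).map pvStrip).foldl (fun acc bc => acc ++ [pvScore seq bc]) [] =
      (a :: t).map (fun bc => pvScore seq (pvStrip bc)) := by
    rw [PySem.List.foldl_append_singleton_eq_map]
    simp [List.map_map, Function.comp_def]
  have hmax : PySem.List.max? ((a :: t).map (fun bc => pvScore seq (pvStrip bc))) (fun y => y) =
      some ((t.map (fun bc => pvScore seq (pvStrip bc))).foldl max (pvScore seq (pvStrip a))) := by
    rw [List.map_cons, PySem.List.max?_id_cons]
  have hmem : (t.map (fun bc => pvScore seq (pvStrip bc))).foldl max (pvScore seq (pvStrip a))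
      ∈ (a :: t).map (fun bc => pvScore seq (pvStrip bc)) :=
    PySem.List.max?_mem hmax
  conv_lhs => rw [score_barcode_for_dict]
  simp only [h1]
  simp only [h2]
  rw [hmax]
  simp only []
  rw [pv_winner_eq]
  rw [List.length_map, pv_filt_length, pv_winner_head]
  rw [if_pos hmem]

set_option maxHeartbeats 1000000 in
theorem pv_altLoop_some (seq : String) (l : List String) :
    ∀ (i b bi tc : Int),
      pvAltLoop seq l i (some b, bi, tc) =
        (some ((l.map (fun bc => pvScore seq (pvStrip bc))).foldl max b),
         (if b < (l.map (fun bc => pvScore seq (pvStrip bc))).foldl max b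
          then i + ((l.map (fun bc => pvScore seq (pvStrip bc))).idxOf
                     ((l.map (fun bc => pvScore seq (pvStrip bc))).foldl max b) : Int)
          else bi),
         (if b < (l.map (fun bc => pvScore seq (pvStrip bc))).foldl max b
          then ((l.map (fun bc => pvScore seq (pvStrip bc))).count
                  ((l.map (fun bc => pvScore seq (pvStrip bc))).foldl max b) : Int)
          else tc + ((l.map (fun bc => pvScore seq (pvStrip bc))).count
                  ((l.map (fun bc => pvScore seq (pvStrip bc))).foldl max b) : Int))) := by
  induction l with
  | nil => intro i b bi tc; simp [pvAltLoop]
  | cons a t ih =>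
      intro i b bi tc
      have hle : ∀ c : Int, c ≤ (t.map (fun bc => pvScore seq (pvStrip bc))).foldl max c :=
        fun c => (PySem.List.le_foldl_max _ _).1
      have hstep : pvAltLoop seq (a :: t) i (some b, bi, tc) =
          pvAltLoop seq t (i + 1)
            (if b < pvScore seq (pvStrip a) then (some (pvScore seq (pvStrip a)), i, 1)
             else if pvScore seq (pvStrip a) == b then (some b, bi, tc + 1)
             else (some b, bi, tc)) := rfl
      rw [hstep]
      simp only [List.map_cons, List.foldl_cons]
      by_cases h1 : b < pvScore seq (pvStrip a)
      · rw [if_pos h1, max_eq_right (le_of_lt h1), ih]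
        have hbm : b < (t.map (fun bc => pvScore seq (pvStrip bc))).foldl max (pvScore seq (pvStrip a)) :=
          lt_of_lt_of_le h1 (hle _)
        rw [if_pos hbm, if_pos hbm]
        by_cases h2 : pvScore seq (pvStrip a) < (t.map (fun bc => pvScore seq (pvStrip bc))).foldl max (pvScore seq (pvStrip a))
        · have hxm : pvScore seq (pvStrip a) ≠ _ := ne_of_lt h2
          rw [if_pos h2, if_pos h2, List.idxOf_cons_ne _ hxm, List.count_cons_of_ne hxm]
          simp only [Prod.mk.injEq, true_and, and_true]
          omega
        · have hxm : pvScore seq (pvStrip a) = _ := le_antisymm (hle _) (not_lt.mp h2)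
          rw [if_neg h2, if_neg h2]
          rw [← hxm, List.idxOf_cons_self, List.count_cons_self]
          simp only [Prod.mk.injEq, true_and, and_true]
          omega
      · rw [if_neg h1, max_eq_left (not_lt.mp h1)]
        by_cases h2 : pvScore seq (pvStrip a) == b
        · have hxb : pvScore seq (pvStrip a) = b := beq_iff_eq.mp h2
          rw [if_pos h2, ih]
          by_cases h3 : b < (t.map (fun bc => pvScore seq (pvStrip bc))).foldl max b
          · have hxm : pvScore seq (pvStrip a) ≠ (t.map (fun bc => pvScore seq (pvStrip bc))).foldl max b := by
              rw [hxb]; exact ne_of_lt h3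
            rw [if_pos h3, if_pos h3, if_pos h3, if_pos h3,
                List.idxOf_cons_ne _ hxm, List.count_cons_of_ne hxm]
            simp only [Prod.mk.injEq, true_and, and_true]
            omega
          · have hxm : pvScore seq (pvStrip a) = (t.map (fun bc => pvScore seq (pvStrip bc))).foldl max b :=
              hxb.trans (le_antisymm (hle b) (not_lt.mp h3))
            rw [if_neg h3, if_neg h3, if_neg h3, if_neg h3, hxm, List.count_cons_self]
            simp only [Prod.mk.injEq, true_and, and_true]
            omega
        · have hxb : pvScore seq (pvStrip a) ≠ b := by simpa using h2
          have hxlt : pvScore seq (pvStrip a) < b := lt_of_le_of_ne (not_lt.mp h1) hxb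
          rw [if_neg h2, ih]
          have hxm : pvScore seq (pvStrip a) ≠ (t.map (fun bc => pvScore seq (pvStrip bc))).foldl max b :=
            ne_of_lt (lt_of_lt_of_le hxlt (hle b))
          by_cases h3 : b < (t.map (fun bc => pvScore seq (pvStrip bc))).foldl max b
          · rw [if_pos h3, if_pos h3, if_pos h3, if_pos h3,
                List.idxOf_cons_ne _ hxm, List.count_cons_of_ne hxm]
            simp only [Prod.mk.injEq, true_and, and_true]
            omega
          · rw [if_neg h3, if_neg h3, if_neg h3, if_neg h3, List.count_cons_of_ne hxm]

theorem pvB_eq (seq : String) (a : String) (t : List String) (min_score : Int) :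
    score_barcode_for_dict_alt seq (a :: t) min_score =
      (if (t.map (fun bc => pvScore seq (pvStrip bc))).foldl max (pvScore seq (pvStrip a)) < min_score
       then "no_match"
       else if 1 < ((a :: t).map (fun bc => pvScore seq (pvStrip bc))).count
              ((t.map (fun bc => pvScore seq (pvStrip bc))).foldl max (pvScore seq (pvStrip a)))
       then "no_match"
       else PySem.List.pyGetD (a :: t)
              ((((a :: t).map (fun bc => pvScore seq (pvStrip bc))).idxOf
                 ((t.map (fun bc => pvScore seq (pvStrip bc))).foldl max (pvScore seq (pvStrip a)))) : Int) "") := by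
  have hle : pvScore seq (pvStrip a) ≤ (t.map (fun bc => pvScore seq (pvStrip bc))).foldl max (pvScore seq (pvStrip a)) :=
    (PySem.List.le_foldl_max _ _).1
  have hstep : pvAltLoop seq (a :: t) 0 (none, 0, 0) =
      pvAltLoop seq t 1 (some (pvScore seq (pvStrip a)), 0, 1) := rfl
  conv_lhs => rw [score_barcode_for_dict_alt]
  rw [hstep, pv_altLoop_some]
  simp only []
  by_cases h4 : pvScore seq (pvStrip a) < (t.map (fun bc => pvScore seq (pvStrip bc))).foldl max (pvScore seq (pvStrip a))
  · have hxm : pvScore seq (pvStrip a) ≠ (t.map (fun bc => pvScore seq (pvStrip bc))).foldl max (pvScore seq (pvStrip a)) :=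
      ne_of_lt h4
    rw [if_pos h4, if_pos h4, List.map_cons, List.count_cons_of_ne hxm, List.idxOf_cons_ne _ hxm]
    by_cases hms : (t.map (fun bc => pvScore seq (pvStrip bc))).foldl max (pvScore seq (pvStrip a)) < min_score
    · simp [hms]
    · rw [if_neg hms]
      by_cases hc : 1 < (t.map (fun bc => pvScore seq (pvStrip bc))).count
          ((t.map (fun bc => pvScore seq (pvStrip bc))).foldl max (pvScore seq (pvStrip a)))
      · simp [hms, hc]
      · have hfneg : ¬ ((decide ((t.map (fun bc => pvScore seq (pvStrip bc))).foldl max (pvScore seq (pvStrip a)) < min_score) ||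
            decide ((1 : Int) < ((t.map (fun bc => pvScore seq (pvStrip bc))).count
              ((t.map (fun bc => pvScore seq (pvStrip bc))).foldl max (pvScore seq (pvStrip a))) : Int))) = true) := by
          simp only [Bool.or_eq_true, decide_eq_true_eq, not_or]
          refine ⟨hms, ?_⟩
          push_cast
          omega
        rw [if_neg hfneg, if_neg hc]
        congr 1
        push_cast
        omega
  · have hxm : pvScore seq (pvStrip a) = (t.map (fun bc => pvScore seq (pvStrip bc))).foldl max (pvScore seq (pvStrip a)) :=
      le_antisymm hle (not_lt.mp h4)
    rw [if_neg h4, if_neg h4, List.map_cons, ← hxm, List.count_cons_self, List.idxOf_cons_self]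
    by_cases hms : pvScore seq (pvStrip a) < min_score
    · simp [hms]
    · by_cases hc : 1 < (t.map (fun bc => pvScore seq (pvStrip bc))).count (pvScore seq (pvStrip a)) + 1
      · have hcast : (1 : Int) < 1 + ((t.map (fun bc => pvScore seq (pvStrip bc))).count (pvScore seq (pvStrip a)) : Int) := by
          push_cast
          omega
        simp [hms, hc, hcast]
      · have hcast : ¬ ((1 : Int) < 1 + ((t.map (fun bc => pvScore seq (pvStrip bc))).count (pvScore seq (pvStrip a)) : Int)) := by
          push_cast
          omega
        simp [hms, hc, hcast]

-- ===== VERDICT (by name: the statement is the Claim_ definition above) =====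
theorem score_barcode_for_dict_spec : Claim_equal_score_barcode_for_dict := by
  intro seq barcodes min_score hdom hpre
  unfold Spec_score_barcode_for_dict
  cases barcodes with
  | nil => exact absurd rfl hpre
  | cons a t => rw [pvA_eq, pvB_eq]
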